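-- pv_equiv track=rewrite | github.com/takutosquare00-max/jlpt-kakunin-test | Minnanonihongo/shared/quiz_parts_helpers.py | build_parts_from_chunk_sizes
-- ===== SOURCE A (Python) =====
-- def build_parts_from_chunk_sizes(
--     f_chunks: tuple[int, ...],
--     k_chunks: tuple[int, ...],
-- ) -> list[tuple[tuple[int, int], tuple[int, int]]]:
--     """
--     復習・漢字をそれぞれ連番区間に分割し、パートごとの (f_range, k_range) を返す。
--
--     例: f_chunks=(10,11,10,10), k_chunks=(8,8,8,8)
--         → [((1,10),(1,8)), ((11,21),(9,16)), ...]
--     """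
--     if len(f_chunks) != len(k_chunks):
--         raise ValueError("f_chunks と k_chunks の長さは等しい必要があります")
--     parts: list[tuple[tuple[int, int], tuple[int, int]]] = []
--     f_lo, k_lo = 1, 1
--     for fw, kw in zip(f_chunks, k_chunks):
--         f_hi = f_lo + fw - 1
--         k_hi = k_lo + kw - 1
--         parts.append(((f_lo, f_hi), (k_lo, k_hi)))
--         f_lo, k_lo = f_hi + 1, k_hi + 1
--     return parts
-- ===== SOURCE B (Python) =====
-- def _edges(chunks):
--     """Cumulative boundary table: [0, c1, c1+c2, ...]."""
--     edges = [0]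
--     total = 0
--     for c in chunks:
--         total += c
--         edges.append(total)
--     return edges
--
--
-- def build_parts_from_chunk_sizes(f_chunks, k_chunks):
--     if len(f_chunks) != len(k_chunks):
--         raise ValueError("f_chunks と k_chunks の長さは等しい必要があります")
--     f_edges = _edges(f_chunks)
--     k_edges = _edges(k_chunks)
--     return [
--         ((fl + 1, fh), (kl + 1, kh))
--         for (fl, fh), (kl, kh) in zip(
--             zip(f_edges, f_edges[1:]), zip(k_edges, k_edges[1:])
--         )
--     ]
-- ===== Notes on version B (the rewrite author's own statement) =====
-- stated objective: idiomatic
-- what changed: B first precomputes cumulative boundary tables ([0]+prefix sums) for both chunk lists, then builds each part from adjacent edge pairs, instead of threading running lower bounds through one loop.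
import Mathlib
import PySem

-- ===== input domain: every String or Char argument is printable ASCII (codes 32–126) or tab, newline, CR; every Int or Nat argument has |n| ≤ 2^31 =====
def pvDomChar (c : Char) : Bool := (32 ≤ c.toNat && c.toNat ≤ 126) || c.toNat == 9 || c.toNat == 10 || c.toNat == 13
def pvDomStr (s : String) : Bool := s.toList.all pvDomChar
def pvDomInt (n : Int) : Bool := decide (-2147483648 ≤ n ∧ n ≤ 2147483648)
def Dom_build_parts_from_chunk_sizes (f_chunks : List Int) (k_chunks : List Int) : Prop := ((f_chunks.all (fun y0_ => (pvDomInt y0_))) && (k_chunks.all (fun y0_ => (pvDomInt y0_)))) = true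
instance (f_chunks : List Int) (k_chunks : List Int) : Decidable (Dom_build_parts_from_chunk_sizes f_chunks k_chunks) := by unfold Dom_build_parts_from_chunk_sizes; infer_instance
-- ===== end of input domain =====

-- B precomputes cumulative boundary tables and pairs adjacent edges, instead of
-- threading running lower bounds through one loop (idiomatic decomposition; same cost).


-- ===== PORT A =====
-- A: one loop over zip(f_chunks, k_chunks), threading (parts, f_lo, k_lo).
def build_parts_from_chunk_sizes (f_chunks : List Int) (k_chunks : List Int) : List ((Int × Int) × (Int × Int)) :=
  let st := (f_chunks.zip k_chunks).foldl
    (fun (st : List ((Int × Int) × (Int × Int)) × Int × Int) fk =>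
      let f_hi := st.2.1 + fk.1 - 1
      let k_hi := st.2.2 + fk.2 - 1
      (st.1 ++ [((st.2.1, f_hi), (st.2.2, k_hi))], f_hi + 1, k_hi + 1))
    ([], 1, 1)
  st.1

-- ===== PORT B =====
-- B helper: cumulative boundary table [0, c1, c1+c2, ...] (Source B's _edges loop).
def pvEdges (chunks : List Int) : List Int :=
  let st := chunks.foldl
    (fun (st : List Int × Int) c => (st.1 ++ [st.2 + c], st.2 + c)) ([0], 0)
  st.1

def build_parts_from_chunk_sizes_alt (f_chunks : List Int) (k_chunks : List Int) : List ((Int × Int) × (Int × Int)) :=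
  let f_edges := pvEdges f_chunks
  let k_edges := pvEdges k_chunks
  ((f_edges.zip (f_edges.drop 1)).zip (k_edges.zip (k_edges.drop 1))).map
    (fun p => ((p.1.1 + 1, p.1.2), (p.2.1 + 1, p.2.2)))

-- ===== PRECONDITION & SPEC =====
-- A raises ValueError when the two lists have different lengths; Pre_ excludes exactly those inputs.
def Pre_build_parts_from_chunk_sizes (f_chunks : List Int) (k_chunks : List Int) : Prop :=
  f_chunks.length = k_chunks.length
instance (f_chunks : List Int) (k_chunks : List Int) : Decidable (Pre_build_parts_from_chunk_sizes f_chunks k_chunks) := by unfold Pre_build_parts_from_chunk_sizes; infer_instance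
def pvWitness_build_parts_from_chunk_sizes : List Int × List Int := ([10, 11, 10], [8, 8, 8])

def Spec_build_parts_from_chunk_sizes (f_chunks : List Int) (k_chunks : List Int) (out : List ((Int × Int) × (Int × Int))) : Prop := out = build_parts_from_chunk_sizes_alt f_chunks k_chunks
instance (f_chunks : List Int) (k_chunks : List Int) (out : List ((Int × Int) × (Int × Int))) : Decidable (Spec_build_parts_from_chunk_sizes f_chunks k_chunks out) := by unfold Spec_build_parts_from_chunk_sizes; infer_instance

-- ===== CLAIM (what is proved, stated in full; the proofs are below) =====
def Claim_equal_build_parts_from_chunk_sizes : Prop := ∀ (f_chunks : List Int) (k_chunks : List Int), Dom_build_parts_from_chunk_sizes f_chunks k_chunks → Pre_build_parts_from_chunk_sizes f_chunks k_chunks → Spec_build_parts_from_chunk_sizes f_chunks k_chunks (build_parts_from_chunk_sizes f_chunks k_chunks)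

-- ===== LEMMAS AND PROOFS =====

-- Reference form both sides are reduced to.
def pvSpecParts : List (Int × Int) → Int → Int → List ((Int × Int) × (Int × Int))
  | [], _, _ => []
  | (x, y) :: rest, a, b =>
      ((a, a + x - 1), (b, b + y - 1)) :: pvSpecParts rest (a + x) (b + y)

-- Prefix sums starting from t (without the leading edge).
def pvPref : List Int → Int → List Int
  | [], _ => []
  | c :: rest, t => (t + c) :: pvPref rest (t + c)

theorem aFold_eq (l : List (Int × Int)) :
    ∀ (acc : List ((Int × Int) × (Int × Int))) (a b : Int),
    (l.foldl
      (fun (st : List ((Int × Int) × (Int × Int)) × Int × Int) fk =>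
        let f_hi := st.2.1 + fk.1 - 1
        let k_hi := st.2.2 + fk.2 - 1
        (st.1 ++ [((st.2.1, f_hi), (st.2.2, k_hi))], f_hi + 1, k_hi + 1))
      (acc, a, b)).1 = acc ++ pvSpecParts l a b := by
  induction l with
  | nil => intro acc a b; simp [pvSpecParts]
  | cons hd tl ih =>
      intro acc a b
      obtain ⟨x, y⟩ := hd
      simp only [List.foldl_cons, pvSpecParts]
      rw [ih]
      simp only [List.append_assoc, List.singleton_append]
      have h1 : a + x - 1 + 1 = a + x := by ring
      have h2 : b + y - 1 + 1 = b + y := by ring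
      rw [h1, h2]

theorem edgesFold_eq (l : List Int) :
    ∀ (acc : List Int) (t : Int),
    (l.foldl (fun (st : List Int × Int) c => (st.1 ++ [st.2 + c], st.2 + c))
      (acc, t)) = (acc ++ pvPref l t, t + l.sum) := by
  induction l with
  | nil => intro acc t; simp [pvPref]
  | cons hd tl ih =>
      intro acc t
      simp only [List.foldl_cons, pvPref]
      rw [ih]
      simp
      ring

theorem pvEdges_eq (l : List Int) : pvEdges l = 0 :: pvPref l 0 := by
  simp [pvEdges, edgesFold_eq]

theorem bShape_eq (f : List Int) :
    ∀ (k : List Int), f.length = k.length → ∀ (t s : Int),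
    (((t :: pvPref f t).zip ((t :: pvPref f t).drop 1)).zip
      ((s :: pvPref k s).zip ((s :: pvPref k s).drop 1))).map
      (fun p => ((p.1.1 + 1, p.1.2), (p.2.1 + 1, p.2.2)))
    = pvSpecParts (f.zip k) (t + 1) (s + 1) := by
  induction f with
  | nil =>
      intro k hk t s
      have : k = [] := List.eq_nil_of_length_eq_zero hk.symm
      subst this
      simp [pvPref, pvSpecParts]
  | cons x f ih =>
      intro k hk t s
      cases k with
      | nil => simp at hk
      | cons y k =>
          simp only [List.length_cons, Nat.succ.injEq] at hk
          simp only [pvPref, List.drop, List.zip_cons_cons, List.map_cons, pvSpecParts]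
          have := ih k hk (t + x) (s + y)
          simp only [List.drop] at this ⊢
          rw [this]
          have h1 : t + 1 + x - 1 = t + x := by ring
          have h2 : s + 1 + y - 1 = s + y := by ring
          have h3 : t + 1 + x = t + x + 1 := by ring
          have h4 : s + 1 + y = s + y + 1 := by ring
          rw [h1, h2, h3, h4]

-- ===== VERDICT (by name: the statement is the Claim_ definition above) =====
theorem build_parts_from_chunk_sizes_spec : Claim_equal_build_parts_from_chunk_sizes := by
  intro f k _ hpre
  unfold Spec_build_parts_from_chunk_sizes
  unfold build_parts_from_chunk_sizes build_parts_from_chunk_sizes_alt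
  simp only [pvEdges_eq, aFold_eq]
  rw [bShape_eq f k hpre 0 0]
  simp
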